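-- pv_equiv track=rewrite | github.com/tfn-pt/prisma-pt | src/scrapers/cargadetrabalhos_scraper.py | merge_timestamps
-- ===== SOURCE A (Python) =====
-- from collections import defaultdict
--
-- def merge_timestamps(seed_results: list, y_start: int, y_end: int) -> dict:
--     by_year_date = defaultdict(dict)
--     for base_url, timestamps in seed_results:
--         for ts in timestamps:
--             y = int(ts[:4]) if len(ts) >= 4 else 0
--             if y_start <= y <= y_end:
--                 by_year_date[y][ts[:8]] = (ts, base_url)
--     return {y: sorted(by_year_date[y].values(), key=lambda p: p[0]) for y in sorted(by_year_date)}
-- ===== SOURCE B (Python) =====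
-- def merge_timestamps(seed_results: list, y_start: int, y_end: int) -> dict:
--     # Decorate-sort-scan: flatten to (year, date, ts, url) events, ONE stable sort
--     # by (year, date), then dedup by keeping the LAST event of each equal-key run
--     # (stability makes that the last-written one, matching dict overwrite), and
--     # group the already-ordered survivors by year in a single pass. No dict dedup.
--     events = []
--     for base_url, timestamps in seed_results:
--         for ts in timestamps:
--             y = int(ts[:4]) if len(ts) >= 4 else 0
--             if y_start <= y <= y_end:
--                 events.append((y, ts[:8], ts, base_url))
--     events.sort(key=lambda e: (e[0], e[1]))
--     out = {}
--     for i, (y, d, ts, url) in enumerate(events):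
--         if i + 1 == len(events) or (events[i + 1][0], events[i + 1][1]) != (y, d):
--             out.setdefault(y, []).append((ts, url))
--     return out
-- ===== Notes on version B (the rewrite author's own statement) =====
-- stated objective: alternative
-- what changed: B replaces A's dict-based dedup-then-per-year-sort with a decorate-sort-scan pipeline: flatten all timestamps to (year, date, ts, url) events, stable-sort them once by (year, date), dedup by keeping only the last event of each equal-key run (stability makes that the last-written one, i.e. A's dict-overwrite survivor), and group the already-ordered survivors by year in one linear pass.
import Mathlib
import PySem

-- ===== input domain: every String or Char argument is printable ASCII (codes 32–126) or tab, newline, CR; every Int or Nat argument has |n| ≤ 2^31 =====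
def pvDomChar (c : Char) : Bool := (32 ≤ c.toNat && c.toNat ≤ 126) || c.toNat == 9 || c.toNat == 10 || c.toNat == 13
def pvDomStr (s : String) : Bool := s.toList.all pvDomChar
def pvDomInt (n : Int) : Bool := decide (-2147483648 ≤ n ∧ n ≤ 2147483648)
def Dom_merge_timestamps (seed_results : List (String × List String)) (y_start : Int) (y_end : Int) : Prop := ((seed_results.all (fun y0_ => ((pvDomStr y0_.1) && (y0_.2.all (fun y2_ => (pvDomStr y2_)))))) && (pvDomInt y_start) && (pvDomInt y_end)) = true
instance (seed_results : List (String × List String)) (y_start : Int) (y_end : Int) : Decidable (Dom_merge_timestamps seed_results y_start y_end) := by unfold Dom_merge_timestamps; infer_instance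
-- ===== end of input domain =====

-- B replaces A's dict-of-dicts dedup + per-year sorts by a decorate-sort-scan pipeline:
-- flatten to (year, date, ts, url) events, ONE stable sort by (year, date), keep the
-- last event of each equal-key run, group the ordered survivors by year in one pass
-- (objective: alternative algorithm, similar cost).

-- Common subexpressions both Pythons contain verbatim:
-- 'int(ts[:4]) if len(ts) >= 4 else 0' (A raises ValueError where the 4-char prefix
-- does not parse; those inputs are excluded by Pre_ below, the port defaults to 0 there)
def pvYear (ts : String) : Int :=
  if 4 ≤ PySem.Str.len ts then (PySem.Int.ofStr? (PySem.Str.slice ts none (some 4))).getD 0 else 0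
-- 'ts[:8]'
def pvDate (ts : String) : String := PySem.Str.slice ts none (some 8)

-- ===== PORT A =====
def merge_timestamps (seed_results : List (String × List String)) (y_start : Int) (y_end : Int) : List (Int × List (String × String)) :=
  let by_year_date : PySem.Dict Int (PySem.Dict String (String × String)) :=
    seed_results.foldl (fun d r =>
      r.2.foldl (fun d ts =>
        if y_start ≤ pvYear ts ∧ pvYear ts ≤ y_end then
          d.modify (pvYear ts) PySem.Dict.empty (fun inner => inner.insert (pvDate ts) (ts, r.1))
        else d) d)
      PySem.Dict.empty
  (PySem.List.sorted by_year_date.keys (fun y => y)).map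
    (fun y => (y, PySem.List.sorted (by_year_date.getD y PySem.Dict.empty).values (fun p => p.1)))

-- ===== PORT B =====
-- the 'keep only the last event of each run of equal (year, date) keys' scan of Source B
-- (the index loop comparing each event with its successor, as structural recursion)
def pvLastOfRun : List (Int × String × String × String) → List (Int × String × String × String)
  | [] => []
  | [e] => [e]
  | e :: e' :: rest =>
      if e.1 = e'.1 ∧ e.2.1 = e'.2.1 then pvLastOfRun (e' :: rest)
      else e :: pvLastOfRun (e' :: rest)

def merge_timestamps_alt (seed_results : List (String × List String)) (y_start : Int) (y_end : Int) : List (Int × List (String × String)) :=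
  let events : List (Int × String × String × String) :=
    seed_results.foldl (fun ev r =>
      r.2.foldl (fun ev ts =>
        if y_start ≤ pvYear ts ∧ pvYear ts ≤ y_end then
          ev ++ [(pvYear ts, pvDate ts, ts, r.1)]
        else ev) ev) []
  ((pvLastOfRun (PySem.List.sorted2 events (fun e => e.1) (fun e => e.2.1))).foldl
    (fun out e => out.modify e.1 [] (fun l => l ++ [(e.2.2.1, e.2.2.2)]))
    (PySem.Dict.empty : PySem.Dict Int (List (String × String)))).items

-- ===== PRECONDITION & SPEC =====
-- Pre_ excludes exactly the inputs where Python A raises ValueError: a timestamp of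
-- length ≥ 4 whose first four characters do not parse as an int.
def Pre_merge_timestamps (seed_results : List (String × List String)) (y_start : Int) (y_end : Int) : Prop :=
  ∀ r ∈ seed_results, ∀ ts ∈ r.2,
    4 ≤ PySem.Str.len ts → (PySem.Int.ofStr? (PySem.Str.slice ts none (some 4))).isSome
instance (seed_results : List (String × List String)) (y_start : Int) (y_end : Int) : Decidable (Pre_merge_timestamps seed_results y_start y_end) := by unfold Pre_merge_timestamps; infer_instance

def pvWitness_merge_timestamps : (List (String × List String)) × Int × Int :=
  ([("u", ["20210103abc", "20210103x", "2020", "ab"])], 2000, 2022)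

def Spec_merge_timestamps (seed_results : List (String × List String)) (y_start : Int) (y_end : Int) (out : List (Int × List (String × String))) : Prop := out = merge_timestamps_alt seed_results y_start y_end
instance (seed_results : List (String × List String)) (y_start : Int) (y_end : Int) (out : List (Int × List (String × String))) : Decidable (Spec_merge_timestamps seed_results y_start y_end out) := by unfold Spec_merge_timestamps; infer_instance

-- ===== CLAIM (what is proved, stated in full; the proofs are below) =====
def Claim_equal_merge_timestamps : Prop := ∀ (seed_results : List (String × List String)) (y_start : Int) (y_end : Int), Dom_merge_timestamps seed_results y_start y_end → Pre_merge_timestamps seed_results y_start y_end → Spec_merge_timestamps seed_results y_start y_end (merge_timestamps seed_results y_start y_end)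

-- ===== LEMMAS AND PROOFS =====

-- an event: (year, (date, (ts, base_url)))
def pvRec (u ts : String) : Int × String × String × String := (pvYear ts, (pvDate ts, (ts, u)))

def pvEvents (seed_results : List (String × List String)) (y_start y_end : Int) : List (Int × String × String × String) :=
  ((seed_results.flatMap (fun r => r.2.map (fun ts => (r.1, ts)))).filter
      (fun p => decide (y_start ≤ pvYear p.2 ∧ pvYear p.2 ≤ y_end))).map
    (fun p => pvRec p.1 p.2)

def pvStepA (d : PySem.Dict Int (PySem.Dict String (String × String))) (e : Int × String × String × String) : PySem.Dict Int (PySem.Dict String (String × String)) :=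
  d.modify e.1 PySem.Dict.empty (fun inner => inner.insert e.2.1 e.2.2)

def pvStepB (d : PySem.Dict (Int × String) (String × String)) (e : Int × String × String × String) : PySem.Dict (Int × String) (String × String) :=
  d.insert (e.1, e.2.1) e.2.2

def pvByd (F : List (Int × String × String × String)) : PySem.Dict Int (PySem.Dict String (String × String)) :=
  F.foldl pvStepA PySem.Dict.empty

def pvDed (F : List (Int × String × String × String)) : PySem.Dict (Int × String) (String × String) :=
  F.foldl pvStepB PySem.Dict.empty

-- the filtered inner loop is a fold of `step` over the filtered-and-mapped event list
theorem pv_inner_fold {δ : Type} (P : String → Prop) [DecidablePred P]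
    (step : δ → (Int × String × String × String) → δ) (u : String) :
    ∀ (tss : List String) (init : δ),
    tss.foldl (fun d ts => if P ts then step d (pvRec u ts) else d) init
      = (((tss.map (fun ts => (u, ts))).filter (fun p => decide (P p.2))).map
          (fun p => pvRec p.1 p.2)).foldl step init := by
  intro tss
  induction tss with
  | nil => intro init; rfl
  | cons t ts ih =>
    intro init
    by_cases h : P t <;> simp [h, ih]

-- the double loop over (base_url, timestamps) pairs is one fold over the flat event list
theorem pv_double_fold {δ : Type} (P : String → Prop) [DecidablePred P]
    (step : δ → (Int × String × String × String) → δ) :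
    ∀ (seed : List (String × List String)) (init : δ),
    seed.foldl (fun d r => r.2.foldl (fun d ts => if P ts then step d (pvRec r.1 ts) else d) d) init
      = (((seed.flatMap (fun r => r.2.map (fun ts => (r.1, ts)))).filter
            (fun p => decide (P p.2))).map (fun p => pvRec p.1 p.2)).foldl step init := by
  intro seed
  induction seed with
  | nil => intro init; rfl
  | cons r rs ih =>
    intro init
    simp only [List.foldl_cons, List.flatMap_cons, List.filter_append, List.map_append,
      List.foldl_append, ih, pv_inner_fold P step r.1 r.2 init]

theorem pv_dictA_eq (seed : List (String × List String)) (y_start y_end : Int) :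
    seed.foldl (fun d r =>
      r.2.foldl (fun d ts =>
        if y_start ≤ pvYear ts ∧ pvYear ts ≤ y_end then
          d.modify (pvYear ts) PySem.Dict.empty (fun inner => inner.insert (pvDate ts) (ts, r.1))
        else d) d)
      PySem.Dict.empty = pvByd (pvEvents seed y_start y_end) := by
  unfold pvByd pvEvents
  rw [show (fun (d : PySem.Dict Int (PySem.Dict String (String × String))) (r : String × List String) =>
        r.2.foldl (fun d ts =>
          if y_start ≤ pvYear ts ∧ pvYear ts ≤ y_end then
            d.modify (pvYear ts) PySem.Dict.empty (fun inner => inner.insert (pvDate ts) (ts, r.1))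
          else d) d)
      = (fun d r => r.2.foldl (fun d ts =>
          if y_start ≤ pvYear ts ∧ pvYear ts ≤ y_end then pvStepA d (pvRec r.1 ts) else d) d) from by
    funext d r
    apply PySem.List.foldl_congr_mem
    intro acc ts _
    simp [pvStepA, pvRec]]
  rw [pv_double_fold (fun ts => y_start ≤ pvYear ts ∧ pvYear ts ≤ y_end) pvStepA seed PySem.Dict.empty]

theorem pv_foldl_append_id {α : Type} : ∀ (l acc : List α), l.foldl (fun a x => a ++ [x]) acc = acc ++ l := by
  intro l
  induction l with
  | nil => simp
  | cons x xs ih => intro acc; simp [ih]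

-- B's event-collecting double loop builds exactly the flat event list
theorem pv_eventsB_eq (seed : List (String × List String)) (y_start y_end : Int) :
    seed.foldl (fun ev r =>
      r.2.foldl (fun ev ts =>
        if y_start ≤ pvYear ts ∧ pvYear ts ≤ y_end then
          ev ++ [(pvYear ts, pvDate ts, ts, r.1)]
        else ev) ev) []
      = pvEvents seed y_start y_end := by
  unfold pvEvents
  rw [show (fun (ev : List (Int × String × String × String)) (r : String × List String) =>
        r.2.foldl (fun ev ts =>
          if y_start ≤ pvYear ts ∧ pvYear ts ≤ y_end then
            ev ++ [(pvYear ts, pvDate ts, ts, r.1)]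
          else ev) ev)
      = (fun ev r => r.2.foldl (fun ev ts =>
          if y_start ≤ pvYear ts ∧ pvYear ts ≤ y_end then
            (fun (l : List (Int × String × String × String)) e => l ++ [e]) ev (pvRec r.1 ts)
          else ev) ev) from by
    funext ev r
    apply PySem.List.foldl_congr_mem
    intro acc ts _
    simp [pvRec]]
  rw [pv_double_fold (fun ts => y_start ≤ pvYear ts ∧ pvYear ts ≤ y_end)
    (fun l e => l ++ [e]) seed [], pv_foldl_append_id, List.nil_append]

-- lookup correspondence between the nested and the flat dict
theorem pv_get_corr (F : List (Int × String × String × String))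
    (d1 : PySem.Dict Int (PySem.Dict String (String × String)))
    (d2 : PySem.Dict (Int × String) (String × String))
    (h : ∀ y t, (d1.getD y PySem.Dict.empty).get? t = d2.get? (y, t)) :
    ∀ y t, ((F.foldl pvStepA d1).getD y PySem.Dict.empty).get? t = (F.foldl pvStepB d2).get? (y, t) := by
  induction F generalizing d1 d2 with
  | nil => exact h
  | cons e F ih =>
    simp only [List.foldl_cons]
    apply ih
    intro y t
    simp only [pvStepA, pvStepB, PySem.Dict.getD_modify, PySem.Dict.get?_insert]
    by_cases hy : y = e.1 <;> by_cases ht : t = e.2.1 <;>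
      simp [hy, ht, h, PySem.Dict.get?_insert, Prod.ext_iff]

theorem pv_inner_nodup (F : List (Int × String × String × String))
    (d1 : PySem.Dict Int (PySem.Dict String (String × String)))
    (h : ∀ y, (d1.getD y PySem.Dict.empty).keys.Nodup) :
    ∀ y, ((F.foldl pvStepA d1).getD y PySem.Dict.empty).keys.Nodup := by
  induction F generalizing d1 with
  | nil => exact h
  | cons e F ih =>
    simp only [List.foldl_cons]
    apply ih
    intro y
    simp only [pvStepA, PySem.Dict.getD_modify]
    by_cases hy : y = e.1 <;> simp [hy]
    · exact PySem.Dict.nodup_keys_insert _ _ _ (h e.1)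
    · exact h y

-- every item of an insert-fold comes from the start dict or from some event
theorem pv_fold_insert_mem (F : List (Int × String × String × String))
    (d : PySem.Dict (Int × String) (String × String)) (p : (Int × String) × (String × String))
    (hp : p ∈ (F.foldl pvStepB d).items) :
    p ∈ d.items ∨ ∃ e ∈ F, p = ((e.1, e.2.1), e.2.2) := by
  induction F generalizing d with
  | nil => exact Or.inl hp
  | cons e F ih =>
    simp only [List.foldl_cons] at hp
    rcases ih (pvStepB d e) hp with h | ⟨e', he', rfl⟩
    · rcases (PySem.Dict.mem_items_insert _ _ _ _).mp h with rfl | ⟨hd, -⟩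
      · exact Or.inr ⟨e, List.mem_cons_self .., rfl⟩
      · exact Or.inl hd
    · exact Or.inr ⟨e', List.mem_cons_of_mem _ he', rfl⟩

theorem pv_ded_items_shape (F : List (Int × String × String × String))
    (hF : ∀ e ∈ F, e.2.1 = pvDate e.2.2.1)
    (p : (Int × String) × (String × String)) (hp : p ∈ (pvDed F).items) :
    p.1.2 = pvDate p.2.1 := by
  rcases pv_fold_insert_mem F PySem.Dict.empty p hp with h | ⟨e, he, rfl⟩
  · simp [PySem.Dict.empty] at h
  · exact hF e he

-- === generic machinery for Python's stable sort by the tuple key (k1 x, k2 x) ===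

-- the insertion comparator sorted2 uses, and the weak/strict lexicographic key orders
def pvCmp {α : Type} (k1 : α → Int) (k2 : α → String) (a b : α) : Bool :=
  decide (k1 a < k1 b) || (!decide (k1 b < k1 a) && decide (k2 a < k2 b))

def pvLe {α : Type} (k1 : α → Int) (k2 : α → String) (a b : α) : Prop :=
  k1 a < k1 b ∨ (k1 a = k1 b ∧ k2 a ≤ k2 b)

def pvLt {α : Type} (k1 : α → Int) (k2 : α → String) (a b : α) : Prop :=
  k1 a < k1 b ∨ (k1 a = k1 b ∧ k2 a < k2 b)

theorem pv_cmp_true {α : Type} (k1 : α → Int) (k2 : α → String) (a b : α) :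
    pvCmp k1 k2 a b = true ↔ pvLt k1 k2 a b := by
  simp only [pvCmp, pvLt, Bool.or_eq_true, Bool.and_eq_true, Bool.not_eq_true',
    decide_eq_true_eq, decide_eq_false_iff_not]
  constructor
  · rintro (h | ⟨h1, h2⟩)
    · exact Or.inl h
    · rcases lt_or_eq_of_le (not_lt.mp h1) with hlt | heq
      · exact Or.inl hlt
      · exact Or.inr ⟨heq, h2⟩
  · rintro (h | ⟨h1, h2⟩)
    · exact Or.inl h
    · exact Or.inr ⟨by omega, h2⟩

theorem pv_cmp_false {α : Type} (k1 : α → Int) (k2 : α → String) (a b : α) :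
    pvCmp k1 k2 a b = false ↔ pvLe k1 k2 b a := by
  simp only [pvCmp, pvLe, Bool.or_eq_false_iff, Bool.and_eq_false_iff,
    decide_eq_false_iff_not, Bool.not_eq_false', decide_eq_true_eq]
  constructor
  · rintro ⟨h1, h2⟩
    rcases h2 with h | h
    · exact Or.inl h
    · rcases lt_or_eq_of_le (not_lt.mp h1) with hlt | heq
      · exact Or.inl hlt
      · exact Or.inr ⟨heq, not_lt.mp h⟩
  · rintro (h | ⟨h1, h2⟩)
    · exact ⟨by omega, Or.inl h⟩
    · exact ⟨by omega, Or.inr (not_lt.mpr h2)⟩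

theorem pv_le_trans {α : Type} (k1 : α → Int) (k2 : α → String) (a b c : α)
    (h1 : pvLe k1 k2 a b) (h2 : pvLe k1 k2 b c) : pvLe k1 k2 a c := by
  rcases h1 with h1 | ⟨e1, l1⟩ <;> rcases h2 with h2 | ⟨e2, l2⟩
  · exact Or.inl (lt_trans h1 h2)
  · exact Or.inl (e2 ▸ h1)
  · exact Or.inl (e1 ▸ h2)
  · exact Or.inr ⟨e1.trans e2, le_trans l1 l2⟩

theorem pv_lt_of_lt_of_le {α : Type} (k1 : α → Int) (k2 : α → String) (a b c : α)
    (h1 : pvLt k1 k2 a b) (h2 : pvLe k1 k2 b c) : pvLt k1 k2 a c := by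
  rcases h1 with h1 | ⟨e1, l1⟩ <;> rcases h2 with h2 | ⟨e2, l2⟩
  · exact Or.inl (lt_trans h1 h2)
  · exact Or.inl (e2 ▸ h1)
  · exact Or.inl (e1 ▸ h2)
  · exact Or.inr ⟨e1.trans e2, lt_of_lt_of_le l1 l2⟩

theorem pv_lt_asymm {α : Type} (k1 : α → Int) (k2 : α → String) (a b : α)
    (h1 : pvLt k1 k2 a b) : ¬ pvLt k1 k2 b a := by
  rintro (h | ⟨e, l⟩) <;> rcases h1 with h' | ⟨e', l'⟩
  · omega
  · omega
  · omega
  · exact absurd l (not_lt.mpr (le_of_lt l'))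

theorem pv_lt_key_ne {α : Type} (k1 : α → Int) (k2 : α → String) (a b : α)
    (h : pvLt k1 k2 a b) : ¬ (k1 a = k1 b ∧ k2 a = k2 b) := by
  rintro ⟨h1, h2⟩
  rcases h with h | ⟨e, l⟩
  · omega
  · rw [h2] at l; exact lt_irrefl _ l

theorem pv_le_ne_lt {α : Type} (k1 : α → Int) (k2 : α → String) (a b : α)
    (h : pvLe k1 k2 a b) (hne : ¬ (k1 a = k1 b ∧ k2 a = k2 b)) : pvLt k1 k2 a b := by
  rcases h with h | ⟨e, l⟩
  · exact Or.inl h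
  · rcases lt_or_eq_of_le l with hl | he
    · exact Or.inr ⟨e, hl⟩
    · exact absurd ⟨e, he⟩ hne

-- pairwise order produced by an insertBy sort, for any total preorder compatible with `before`
theorem pv_insertBy_pairwise {α : Type} (before : α → α → Bool) (R : α → α → Prop)
    (htrans : ∀ a b c, R a b → R b c → R a c)
    (ht : ∀ a b, before a b = true → R a b) (hf : ∀ a b, before a b = false → R b a)
    (x : α) (ys : List α) (h : ys.Pairwise R) : (PySem.List.insertBy before x ys).Pairwise R := by
  induction ys with
  | nil => simp [PySem.List.insertBy]
  | cons y ys ih =>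
    have heq : PySem.List.insertBy before x (y :: ys)
        = if before x y then x :: y :: ys else y :: PySem.List.insertBy before x ys := rfl
    rw [heq]
    rcases List.pairwise_cons.mp h with ⟨hy, hys⟩
    by_cases hb : before x y = true
    · simp only [hb, if_true]
      refine List.pairwise_cons.mpr ⟨?_, h⟩
      intro z hz
      rcases List.mem_cons.mp hz with rfl | hz
      · exact ht _ _ hb
      · exact htrans _ _ _ (ht _ _ hb) (hy z hz)
    · simp only [hb]
      refine List.pairwise_cons.mpr ⟨?_, ih hys⟩
      intro z hz
      rcases (PySem.List.insertBy_mem_iff before x z ys).mp hz with rfl | hz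
      · exact hf _ _ (by simpa using hb)
      · exact hy z hz

theorem pv_foldl_insertBy_pairwise {α : Type} (before : α → α → Bool) (R : α → α → Prop)
    (htrans : ∀ a b c, R a b → R b c → R a c)
    (ht : ∀ a b, before a b = true → R a b) (hf : ∀ a b, before a b = false → R b a)
    (xs acc : List α) (h : acc.Pairwise R) :
    (xs.foldl (fun a x => PySem.List.insertBy before x a) acc).Pairwise R := by
  induction xs generalizing acc with
  | nil => exact h
  | cons x xs ih =>
    exact ih _ (pv_insertBy_pairwise before R htrans ht hf x acc h)

theorem pv_sorted2_pairwise {α : Type} (xs : List α) (k1 : α → Int) (k2 : α → String) :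
    (PySem.List.sorted2 xs k1 k2).Pairwise (pvLe k1 k2) := by
  have heq : PySem.List.sorted2 xs k1 k2
      = xs.foldl (fun acc x => PySem.List.insertBy (pvCmp k1 k2) x acc) [] := rfl
  rw [heq]
  refine pv_foldl_insertBy_pairwise _ (pvLe k1 k2) (pv_le_trans k1 k2) ?_ ?_ xs [] List.Pairwise.nil
  · intro a b h
    rcases (pv_cmp_true k1 k2 a b).mp h with h | ⟨e, l⟩
    · exact Or.inl h
    · exact Or.inr ⟨e, le_of_lt l⟩
  · intro a b h
    exact (pv_cmp_false k1 k2 a b).mp h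

-- stability of sorted2: filtering to one key value commutes with the sort
theorem pv_insertBy_filter {α : Type} (k1 : α → Int) (k2 : α → String) (ky : Int) (kd : String) (x : α) :
    ∀ (l : List α), l.Pairwise (pvLe k1 k2) →
    (PySem.List.insertBy (pvCmp k1 k2) x l).filter (fun f => decide (k1 f = ky ∧ k2 f = kd)) =
      if k1 x = ky ∧ k2 x = kd then
        l.filter (fun f => decide (k1 f = ky ∧ k2 f = kd)) ++ [x]
      else l.filter (fun f => decide (k1 f = ky ∧ k2 f = kd)) := by
  intro l
  induction l with
  | nil =>
    intro _
    by_cases hx : k1 x = ky ∧ k2 x = kd <;> simp [PySem.List.insertBy, hx]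
  | cons y ys ih =>
    intro hpw
    have heq : PySem.List.insertBy (pvCmp k1 k2) x (y :: ys)
        = if pvCmp k1 k2 x y then x :: y :: ys
          else y :: PySem.List.insertBy (pvCmp k1 k2) x ys := rfl
    rw [heq]
    rcases List.pairwise_cons.mp hpw with ⟨hy, hys⟩
    by_cases hc : pvCmp k1 k2 x y = true
    · have hlt : pvLt k1 k2 x y := (pv_cmp_true k1 k2 x y).mp hc
      simp only [hc, if_true]
      by_cases hx : k1 x = ky ∧ k2 x = kd
      · have hnil : (y :: ys).filter (fun f => decide (k1 f = ky ∧ k2 f = kd)) = [] := by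
          rw [List.filter_eq_nil_iff]
          intro f hf
          simp only [decide_eq_true_eq]
          intro hfk
          have hxf : pvLt k1 k2 x f := by
            rcases List.mem_cons.mp hf with rfl | hf'
            · exact hlt
            · exact pv_lt_of_lt_of_le k1 k2 x y f hlt (hy f hf')
          exact pv_lt_key_ne k1 k2 x f hxf ⟨hx.1.trans hfk.1.symm, hx.2.trans hfk.2.symm⟩
        rw [List.filter_cons_of_pos (by simp [hx.1, hx.2]), hnil, if_pos hx]
        rfl
      · rw [List.filter_cons_of_neg (by simp [hx]), if_neg hx]
    · have hc' : pvCmp k1 k2 x y = false := by simpa using hc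
      rw [if_neg (by simp [hc'])]
      by_cases hpy : k1 y = ky ∧ k2 y = kd
      · rw [List.filter_cons_of_pos (by simp [hpy.1, hpy.2]),
          List.filter_cons_of_pos (by simp [hpy.1, hpy.2]), ih hys]
        by_cases hx : k1 x = ky ∧ k2 x = kd
        · rw [if_pos hx, if_pos hx]
          simp
        · rw [if_neg hx, if_neg hx]
      · rw [List.filter_cons_of_neg (by simp [hpy]),
          List.filter_cons_of_neg (by simp [hpy]), ih hys]

theorem pv_foldl_insertBy_filter {α : Type} (k1 : α → Int) (k2 : α → String) (ky : Int) (kd : String) :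
    ∀ (xs acc : List α), acc.Pairwise (pvLe k1 k2) →
    (xs.foldl (fun a x => PySem.List.insertBy (pvCmp k1 k2) x a) acc).filter
        (fun f => decide (k1 f = ky ∧ k2 f = kd))
      = acc.filter (fun f => decide (k1 f = ky ∧ k2 f = kd))
        ++ xs.filter (fun f => decide (k1 f = ky ∧ k2 f = kd)) := by
  intro xs
  induction xs with
  | nil => intro acc _; simp
  | cons x xs ih =>
    intro acc hacc
    have hacc' : (PySem.List.insertBy (pvCmp k1 k2) x acc).Pairwise (pvLe k1 k2) := by
      refine pv_insertBy_pairwise _ _ (pv_le_trans k1 k2) ?_ ?_ x acc hacc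
      · intro a b h
        rcases (pv_cmp_true k1 k2 a b).mp h with h | ⟨e, l⟩
        · exact Or.inl h
        · exact Or.inr ⟨e, le_of_lt l⟩
      · intro a b h
        exact (pv_cmp_false k1 k2 a b).mp h
    rw [List.foldl_cons, ih _ hacc', pv_insertBy_filter k1 k2 ky kd x acc hacc,
      List.filter_cons]
    by_cases hx : k1 x = ky ∧ k2 x = kd <;> simp [hx]

theorem pv_sorted2_filter {α : Type} (xs : List α) (k1 : α → Int) (k2 : α → String)
    (ky : Int) (kd : String) :
    (PySem.List.sorted2 xs k1 k2).filter (fun f => decide (k1 f = ky ∧ k2 f = kd))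
      = xs.filter (fun f => decide (k1 f = ky ∧ k2 f = kd)) := by
  have heq : PySem.List.sorted2 xs k1 k2
      = xs.foldl (fun acc x => PySem.List.insertBy (pvCmp k1 k2) x acc) [] := rfl
  rw [heq, pv_foldl_insertBy_filter k1 k2 ky kd xs [] List.Pairwise.nil]
  simp

-- the flat dict's lookup is the LAST matching event
theorem pv_foldl_insert_get? :
    ∀ (F : List (Int × String × String × String)) (d : PySem.Dict (Int × String) (String × String))
      (ky : Int) (kd : String),
    (F.foldl pvStepB d).get? (ky, kd)
      = ((F.filter (fun f => decide (f.1 = ky ∧ f.2.1 = kd))).getLast?.map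
          (fun f => f.2.2)).or (d.get? (ky, kd)) := by
  intro F
  induction F with
  | nil => intro d ky kd; simp
  | cons e F ih =>
    intro d ky kd
    rw [List.foldl_cons, ih (pvStepB d e) ky kd]
    by_cases he : e.1 = ky ∧ e.2.1 = kd
    · rw [List.filter_cons_of_pos (by simp [he.1, he.2])]
      cases hrest : F.filter (fun f => decide (f.1 = ky ∧ f.2.1 = kd)) with
      | nil =>
        have hgot : (pvStepB d e).get? (ky, kd) = some e.2.2 := by
          simp [pvStepB, PySem.Dict.get?_insert, ← he.1, ← he.2]
        simp [hgot]
      | cons x xs =>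
        obtain ⟨z, hz⟩ : ∃ z, (x :: xs).getLast? = some z := by
          cases h' : (x :: xs).getLast? with
          | none => simp [List.getLast?_eq_none_iff] at h'
          | some z => exact ⟨z, rfl⟩
        rw [List.getLast?_cons_cons, hz]
        simp
    · rw [List.filter_cons_of_neg (by simp [he])]
      have hne : (ky, kd) ≠ (e.1, e.2.1) := by
        intro h
        exact he ⟨congrArg Prod.fst h |>.symm, congrArg Prod.snd h |>.symm⟩
      have hgot : (pvStepB d e).get? (ky, kd) = d.get? (ky, kd) := by
        simp [pvStepB, PySem.Dict.get?_insert, hne]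
      rw [hgot]

-- === the last-of-run scan, characterised on key-sorted lists ===

theorem pv_lastOfRun_subset :
    ∀ (s : List (Int × String × String × String)) (e : Int × String × String × String),
    e ∈ pvLastOfRun s → e ∈ s := by
  intro s
  induction s with
  | nil => simp [pvLastOfRun]
  | cons a rest ih =>
    cases rest with
    | nil => simp [pvLastOfRun]
    | cons b rest' =>
      intro e he
      by_cases h : a.1 = b.1 ∧ a.2.1 = b.2.1
      · rw [pvLastOfRun, if_pos h] at he
        exact List.mem_cons_of_mem _ (ih e he)
      · rw [pvLastOfRun, if_neg h] at he
        rcases List.mem_cons.mp he with rfl | he'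
        · exact List.mem_cons_self ..
        · exact List.mem_cons_of_mem _ (ih e he')

def pvK1 (e : Int × String × String × String) : Int := e.1
def pvK2 (e : Int × String × String × String) : String := e.2.1

theorem pv_lastOfRun_pairwise :
    ∀ (s : List (Int × String × String × String)), s.Pairwise (pvLe pvK1 pvK2) →
    (pvLastOfRun s).Pairwise (pvLt pvK1 pvK2) := by
  intro s
  induction s with
  | nil => intro _; simp [pvLastOfRun]
  | cons a rest ih =>
    cases rest with
    | nil => intro _; simp [pvLastOfRun]
    | cons b rest' =>
      intro hpw
      rcases List.pairwise_cons.mp hpw with ⟨ha, htail⟩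
      by_cases h : a.1 = b.1 ∧ a.2.1 = b.2.1
      · rw [pvLastOfRun, if_pos h]
        exact ih htail
      · rw [pvLastOfRun, if_neg h]
        refine List.pairwise_cons.mpr ⟨?_, ih htail⟩
        intro f hf
        have hfmem : f ∈ b :: rest' := pv_lastOfRun_subset _ f hf
        have hab : pvLt pvK1 pvK2 a b :=
          pv_le_ne_lt pvK1 pvK2 a b (ha b (List.mem_cons_self ..)) h
        rcases List.mem_cons.mp hfmem with rfl | hf'
        · exact hab
        · exact pv_lt_of_lt_of_le pvK1 pvK2 a b f hab
            ((List.pairwise_cons.mp htail).1 f hf')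

theorem pv_lastOfRun_mem_iff :
    ∀ (s : List (Int × String × String × String)), s.Pairwise (pvLe pvK1 pvK2) →
    ∀ (e : Int × String × String × String),
    (e ∈ pvLastOfRun s ↔
      (s.filter (fun f => decide (f.1 = e.1 ∧ f.2.1 = e.2.1))).getLast? = some e) := by
  intro s
  induction s with
  | nil => intro _ e; simp [pvLastOfRun]
  | cons a rest ih =>
    cases rest with
    | nil =>
      intro _ e
      rw [show pvLastOfRun [a] = [a] from rfl]
      by_cases hp : a.1 = e.1 ∧ a.2.1 = e.2.1
      · rw [List.filter_cons_of_pos (by simp [hp.1, hp.2])]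
        simp [eq_comm]
      · rw [List.filter_cons_of_neg (by simp [hp])]
        constructor
        · intro hmem
          rcases List.mem_singleton.mp hmem with rfl
          exact absurd ⟨rfl, rfl⟩ hp
        · intro hh
          simp at hh
    | cons b rest' =>
      intro hpw e
      rcases List.pairwise_cons.mp hpw with ⟨ha, htail⟩
      by_cases h : a.1 = b.1 ∧ a.2.1 = b.2.1
      · rw [pvLastOfRun, if_pos h]
        rw [ih htail e]
        by_cases hp : a.1 = e.1 ∧ a.2.1 = e.2.1
        · have hpb : b.1 = e.1 ∧ b.2.1 = e.2.1 := ⟨h.1 ▸ hp.1, h.2 ▸ hp.2⟩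
          rw [List.filter_cons_of_pos (by simp [hpb.1, hpb.2]),
            List.filter_cons_of_pos (by simp [hp.1, hp.2]),
            List.filter_cons_of_pos (by simp [hpb.1, hpb.2]),
            List.getLast?_cons_cons]
        · have hpb' : ¬(b.1 = e.1 ∧ b.2.1 = e.2.1) := fun hh => hp ⟨h.1.trans hh.1, h.2.trans hh.2⟩
          rw [List.filter_cons_of_neg (by simp [hpb']),
            List.filter_cons_of_neg (by simp [hp]),
            List.filter_cons_of_neg (by simp [hpb'])]
      · rw [pvLastOfRun, if_neg h]
        have hab : pvLt pvK1 pvK2 a b :=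
          pv_le_ne_lt pvK1 pvK2 a b (ha b (List.mem_cons_self ..)) h
        have haf : ∀ f ∈ b :: rest', pvLt pvK1 pvK2 a f := by
          intro f hf
          rcases List.mem_cons.mp hf with rfl | hf'
          · exact hab
          · exact pv_lt_of_lt_of_le pvK1 pvK2 a b f hab
              ((List.pairwise_cons.mp htail).1 f hf')
        by_cases hp : a.1 = e.1 ∧ a.2.1 = e.2.1
        · have hnil : (b :: rest').filter (fun f => decide (f.1 = e.1 ∧ f.2.1 = e.2.1)) = [] := by
            rw [List.filter_eq_nil_iff]
            intro f hf
            simp only [decide_eq_true_eq]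
            intro hfk
            exact pv_lt_key_ne pvK1 pvK2 a f (haf f hf)
              ⟨hp.1.trans hfk.1.symm, hp.2.trans hfk.2.symm⟩
          rw [List.filter_cons_of_pos (by simp [hp.1, hp.2]), hnil]
          simp only [List.getLast?_singleton, Option.some_inj]
          constructor
          · intro hmem
            rcases List.mem_cons.mp hmem with rfl | hmem'
            · rfl
            · have : e ∈ b :: rest' := pv_lastOfRun_subset _ e hmem'
              exact absurd ⟨hp.1, hp.2⟩ (pv_lt_key_ne pvK1 pvK2 a e (haf e this))
          · intro hae
            rw [hae]
            exact List.mem_cons_self ..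
        · rw [List.filter_cons_of_neg (by simp [hp]), ← ih htail e]
          constructor
          · intro hmem
            rcases List.mem_cons.mp hmem with rfl | hmem'
            · exact absurd ⟨rfl, rfl⟩ hp
            · exact hmem'
          · intro hmem
            exact List.mem_cons_of_mem _ hmem

-- === string-prefix order: comparing date prefixes agrees with comparing timestamps ===

theorem pv_take_lt : ∀ (a b : List Char) (n : Nat), a.take n < b.take n → a < b := by
  intro a
  induction a with
  | nil =>
    intro b n h
    cases b with
    | nil => simp at h
    | cons y ys => exact List.nil_lt_cons y ys
  | cons x xs ih =>
    intro b n h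
    cases b with
    | nil =>
      cases n with
      | zero => simp at h
      | succ m => simp at h
    | cons y ys =>
      cases n with
      | zero => simp at h
      | succ m =>
        simp only [List.take_succ_cons] at h
        rcases List.cons_lt_cons_iff.mp h with hxy | ⟨hxy, htail⟩
        · exact List.cons_lt_cons_iff.mpr (Or.inl hxy)
        · exact List.cons_lt_cons_iff.mpr (Or.inr ⟨hxy, ih ys m htail⟩)

theorem pv_date_toList (ts : String) : (pvDate ts).toList = ts.toList.take 8 := by
  rw [show (pvDate ts).toList = PySem.List.slice ts.toList none (some 8) from by
    simp [pvDate]]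
  rw [PySem.List.slice_to ts.toList (by norm_num : (0:Int) ≤ 8)]
  rw [show (8:Int).toNat = 8 from rfl]

theorem pv_date_lt (ts1 ts2 : String) (h : pvDate ts1 < pvDate ts2) : ts1 < ts2 := by
  rw [String.lt_iff_toList_lt] at h ⊢
  rw [pv_date_toList, pv_date_toList] at h
  exact pv_take_lt _ _ 8 h

theorem pv_date_le (ts1 ts2 : String) (h : ts1 < ts2) : pvDate ts1 ≤ pvDate ts2 := by
  by_contra hc
  exact absurd (lt_trans (pv_date_lt ts2 ts1 (not_le.mp hc)) h) (lt_irrefl _)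

-- === A-side machinery (dict of dicts, per-year sorts), as in the ports' shared event view ===

def pvR (a b : (Int × String) × (String × String)) : Prop :=
  a.1.1 < b.1.1 ∨ (a.1.1 = b.1.1 ∧ a.2.1 ≤ b.2.1)

theorem pv_sorted2_items_pairwise (xs : List ((Int × String) × (String × String))) :
    (PySem.List.sorted2 xs (fun kv => kv.1.1) (fun kv => kv.2.1)).Pairwise pvR := by
  have h := pv_sorted2_pairwise xs (fun kv => kv.1.1) (fun kv => kv.2.1)
  exact h.imp (fun hab => hab)

-- the globally sorted item list, the year list and the per-year value lists
def pvOrdered (F : List (Int × String × String × String)) : List ((Int × String) × (String × String)) :=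
  PySem.List.sorted2 (pvDed F).items (fun kv => kv.1.1) (fun kv => kv.2.1)

def pvYS (F : List (Int × String × String × String)) : List Int :=
  PySem.Set.ofList ((pvOrdered F).map (fun kv => kv.1.1))

def pvVal (F : List (Int × String × String × String)) (y : Int) : List (String × String) :=
  ((pvOrdered F).filter (fun kv => kv.1.1 == y)).map (fun kv => kv.2)

theorem pv_update_nil {κ : Type} [BEq κ] (xs : List κ) :
    PySem.Set.update ([] : PySem.Set κ) xs = PySem.Set.ofList xs := by
  rw [PySem.Set.ofList_eq_foldl]; rfl

-- a Set.ofList is a sublist of its source list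
theorem pv_foldl_add_ex {α : Type} [BEq α] :
    ∀ (xs acc : List α), ∃ t, xs.foldl PySem.Set.add acc = acc ++ t ∧ t.Sublist xs := by
  intro xs
  induction xs with
  | nil => intro acc; exact ⟨[], by simp⟩
  | cons x xs ih =>
    intro acc
    simp only [List.foldl_cons]
    rcases ih (PySem.Set.add acc x) with ⟨t, hEq, hSub⟩
    have hadd : PySem.Set.add acc x = acc ∨ PySem.Set.add acc x = acc ++ [x] := by
      unfold PySem.Set.add; split <;> simp
    rcases hadd with h | h
    · exact ⟨t, by rw [hEq, h], hSub.cons x⟩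
    · exact ⟨x :: t, by rw [hEq, h]; simp, hSub.cons₂ x⟩

theorem pv_ofList_sublist {α : Type} [BEq α] (xs : List α) :
    (PySem.Set.ofList xs).Sublist xs := by
  rw [PySem.Set.ofList_eq_foldl]
  rcases pv_foldl_add_ex xs [] with ⟨t, hEq, hSub⟩
  simpa [hEq] using hSub

theorem pv_ded_keys (F : List (Int × String × String × String)) :
    (pvDed F).keys = PySem.Set.ofList (F.map (fun e => (e.1, e.2.1))) := by
  have h := PySem.Dict.keys_foldl_insert_key F (fun e => (e.1, e.2.1)) (fun _ e => e.2.2)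
    PySem.Dict.empty
  rw [show (pvDed F).keys = PySem.Set.update PySem.Dict.empty.keys (F.map (fun e => (e.1, e.2.1)))
      from h, PySem.Dict.keys_empty, pv_update_nil]

theorem pv_ded_nodup (F : List (Int × String × String × String)) : (pvDed F).keys.Nodup :=
  PySem.Dict.nodup_keys_foldl_insert_key F (fun e => (e.1, e.2.1)) (fun _ e => e.2.2)
    PySem.Dict.empty PySem.Dict.nodup_keys_empty

theorem pv_byd_keys (F : List (Int × String × String × String)) :
    (pvByd F).keys = PySem.Set.ofList (F.map (fun e => e.1)) := by
  have h := PySem.Dict.keys_foldl_modify_key F (fun e => e.1) PySem.Dict.empty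
    (fun _ e => fun inner => inner.insert e.2.1 e.2.2) PySem.Dict.empty
  rw [show (pvByd F).keys = PySem.Set.update PySem.Dict.empty.keys (F.map (fun e => e.1))
      from h, PySem.Dict.keys_empty, pv_update_nil]

theorem pv_ordered_pairwise (F : List (Int × String × String × String)) :
    (pvOrdered F).Pairwise pvR := pv_sorted2_items_pairwise _

theorem pv_ordered_perm (F : List (Int × String × String × String)) :
    (pvOrdered F).Perm (pvDed F).items := PySem.List.sorted2_perm _ _ _ _

theorem pv_ordered_keys_nodup (F : List (Int × String × String × String)) :
    ((pvOrdered F).map (fun kv => kv.1)).Nodup := by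
  have hperm : ((pvOrdered F).map (fun kv => kv.1)).Perm ((pvDed F).items.map (fun kv => kv.1)) :=
    (pv_ordered_perm F).map _
  have : ((pvDed F).items.map (fun kv => kv.1)).Nodup := pv_ded_nodup F
  exact hperm.nodup_iff.mpr this

theorem pv_mem_ordered (F : List (Int × String × String × String)) (y : Int) (t : String)
    (v : String × String) :
    ((y, t), v) ∈ pvOrdered F ↔ (pvDed F).get? (y, t) = some v := by
  rw [(pv_ordered_perm F).mem_iff]
  exact (PySem.Dict.get?_eq_some_iff_mem_items _ _ _ (pv_ded_nodup F)).symm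

theorem pv_corr (F : List (Int × String × String × String)) :
    ∀ y t, ((pvByd F).getD y PySem.Dict.empty).get? t = (pvDed F).get? (y, t) :=
  pv_get_corr F PySem.Dict.empty PySem.Dict.empty
    (by intro y t; simp [PySem.Dict.getD_empty, PySem.Dict.get?_empty])

theorem pv_innernd (F : List (Int × String × String × String)) :
    ∀ y, ((pvByd F).getD y PySem.Dict.empty).keys.Nodup :=
  pv_inner_nodup F PySem.Dict.empty
    (by intro y; simp [PySem.Dict.getD_empty, PySem.Dict.keys_empty])

-- A's sorted year list is the (already ascending) year list of the global order
theorem pv_keys_sorted (F : List (Int × String × String × String)) :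
    PySem.List.sorted (pvByd F).keys (fun y => y) = pvYS F := by
  apply PySem.List.sorted_eq_of_perm_of_pairwise_lt
  · have hnd1 : (pvYS F).Nodup := PySem.Set.nodup_ofList _
    have hnd2 : (pvByd F).keys.Nodup := by rw [pv_byd_keys]; exact PySem.Set.nodup_ofList _
    rw [List.perm_ext_iff_of_nodup hnd1 hnd2]
    intro y
    rw [show pvYS F = PySem.Set.ofList ((pvOrdered F).map (fun kv => kv.1.1)) from rfl,
      PySem.Set.mem_ofList, pv_byd_keys, PySem.Set.mem_ofList]
    constructor
    · intro hy
      obtain ⟨kv, hkv, rfl⟩ := List.mem_map.mp hy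
      have hk : kv.1 ∈ (pvDed F).keys :=
        PySem.Dict.mem_keys_of_mem_items _ ((pv_ordered_perm F).subset hkv)
      rw [pv_ded_keys, PySem.Set.mem_ofList] at hk
      obtain ⟨e, he, heq⟩ := List.mem_map.mp hk
      exact List.mem_map.mpr ⟨e, he, by rw [← heq]⟩
    · intro hy
      obtain ⟨e, he, rfl⟩ := List.mem_map.mp hy
      have hk : (e.1, e.2.1) ∈ (pvDed F).keys := by
        rw [pv_ded_keys, PySem.Set.mem_ofList]
        exact List.mem_map.mpr ⟨e, he, rfl⟩
      obtain ⟨kv, hkv, heq⟩ := List.mem_map.mp (show (e.1, e.2.1) ∈ (pvDed F).items.map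
        (fun kv => kv.1) from hk)
      have hkv' : kv ∈ pvOrdered F := (pv_ordered_perm F).mem_iff.mpr hkv
      exact List.mem_map.mpr ⟨kv, hkv', by rw [heq]⟩
  · have hle : ((pvOrdered F).map (fun kv => kv.1.1)).Pairwise (fun a b => a ≤ b) := by
      rw [List.pairwise_map]
      exact (pv_ordered_pairwise F).imp
        (fun hab => by rcases hab with h | ⟨h, -⟩; exacts [le_of_lt h, le_of_eq h])
    have hmono : (pvYS F).Pairwise (fun a b => a ≤ b) :=
      List.Pairwise.sublist (pv_ofList_sublist _) hle
    have hnd : (pvYS F).Pairwise (fun (a b : Int) => a ≠ b) := PySem.Set.nodup_ofList _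
    exact (hmono.and hnd).imp (fun ⟨h1, h2⟩ => lt_of_le_of_ne h1 h2)

-- A's per-year sorted value list is the per-year group of the global order
theorem pv_vals_sorted (F : List (Int × String × String × String))
    (hF : ∀ e ∈ F, e.2.1 = pvDate e.2.2.1) (y : Int) :
    PySem.List.sorted ((pvByd F).getD y PySem.Dict.empty).values (fun p => p.1) = pvVal F y := by
  have hshape : ∀ p ∈ pvOrdered F, p.1.2 = pvDate p.2.1 :=
    fun p hp => pv_ded_items_shape F hF p ((pv_ordered_perm F).subset hp)
  have hitems_shape : ∀ p ∈ ((pvByd F).getD y PySem.Dict.empty).items, p.1 = pvDate p.2.1 := by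
    intro p hp
    have hget : ((pvByd F).getD y PySem.Dict.empty).get? p.1 = some p.2 :=
      (PySem.Dict.get?_eq_some_iff_mem_items _ _ _ (pv_innernd F y)).mpr
        (by simpa using hp)
    rw [pv_corr] at hget
    have := pv_ded_items_shape F hF ((y, p.1), p.2)
      (PySem.Dict.mem_items_of_get?_eq_some _ hget)
    simpa using this
  have hpw : (pvVal F y).Pairwise (fun a b => a.1 < b.1) := by
    unfold pvVal
    rw [List.pairwise_map]
    have h1 : ((pvOrdered F).filter (fun kv => kv.1.1 == y)).Pairwise pvR :=
      List.Pairwise.sublist List.filter_sublist (pv_ordered_pairwise F)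
    have h2 : ((pvOrdered F).filter (fun kv => kv.1.1 == y)).Pairwise
        (fun a b => a.1 ≠ b.1) := by
      have hnd : (((pvOrdered F).filter (fun kv => kv.1.1 == y)).map (fun kv => kv.1)).Nodup :=
        (List.filter_sublist.map _).nodup (pv_ordered_keys_nodup F)
      exact List.pairwise_map.mp hnd
    refine (h1.and h2).imp_of_mem ?_
    intro a b ha hb hR
    obtain ⟨hR, hne⟩ := hR
    have hay : a.1.1 = y := by simpa using (List.mem_filter.mp ha).2
    have hby : b.1.1 = y := by simpa using (List.mem_filter.mp hb).2
    rcases hR with hlt | ⟨-, hle⟩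
    · omega
    · refine lt_of_le_of_ne hle (fun hts => hne ?_)
      have h1 := hshape a (List.mem_of_mem_filter ha)
      have h2 := hshape b (List.mem_of_mem_filter hb)
      have : a.1.2 = b.1.2 := by rw [h1, h2, hts]
      exact Prod.ext (hay.trans hby.symm) this
  apply PySem.List.sorted_eq_of_perm_of_pairwise_lt
  · have hvnd : ((pvByd F).getD y PySem.Dict.empty).values.Nodup := by
      have hknd : (((pvByd F).getD y PySem.Dict.empty).items.map (fun p => p.1)).Nodup :=
        pv_innernd F y
      refine List.Nodup.map_on ?_ (List.Nodup.of_map _ hknd)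
      intro p hp q hq hpq
      have : p.1 = q.1 := by
        rw [hitems_shape p hp, hitems_shape q hq, hpq]
      exact List.inj_on_of_nodup_map hknd hp hq this
    have hvalnd : (pvVal F y).Nodup := hpw.imp (fun h => by rintro rfl; exact lt_irrefl _ h)
    rw [List.perm_ext_iff_of_nodup hvalnd hvnd]
    intro v
    constructor
    · intro hv
      obtain ⟨kv, hkvmem, rfl⟩ := List.mem_map.mp hv
      obtain ⟨hkv, hkvy⟩ := List.mem_filter.mp hkvmem
      have hy : kv.1.1 = y := by simpa using hkvy
      have hkv' : ((y, kv.1.2), kv.2) ∈ pvOrdered F := by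
        have : ((kv.1.1, kv.1.2), kv.2) = kv := by simp
        rw [← hy] at *
        rw [this]
        exact hkv
      have hget := (pv_mem_ordered F y kv.1.2 kv.2).mp hkv'
      rw [← pv_corr] at hget
      have hmem := (PySem.Dict.get?_eq_some_iff_mem_items _ _ _ (pv_innernd F y)).mp hget
      exact List.mem_map.mpr ⟨(kv.1.2, kv.2), hmem, rfl⟩
    · intro hv
      obtain ⟨p, hp, rfl⟩ := List.mem_map.mp hv
      have hget : ((pvByd F).getD y PySem.Dict.empty).get? p.1 = some p.2 :=
        (PySem.Dict.get?_eq_some_iff_mem_items _ _ _ (pv_innernd F y)).mpr (by simpa using hp)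
      rw [pv_corr] at hget
      have hmem := (pv_mem_ordered F y p.1 p.2).mpr hget
      refine List.mem_map.mpr ⟨((y, p.1), p.2), List.mem_filter.mpr ⟨hmem, by simp⟩, rfl⟩
  · exact hpw

-- B's grouping fold, characterised
theorem pv_out_items (F : List (Int × String × String × String)) :
    ((pvOrdered F).foldl (fun out kv => out.modify kv.1.1 [] (fun l => l ++ [kv.2]))
      (PySem.Dict.empty : PySem.Dict Int (List (String × String)))).items
      = (pvYS F).map (fun y => (y, pvVal F y)) := by
  have hnd := PySem.Dict.nodup_keys_foldl_modify_key (pvOrdered F) (fun kv => kv.1.1) []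
    (fun _ kv => fun l => l ++ [kv.2]) PySem.Dict.empty PySem.Dict.nodup_keys_empty
  have hkeys : ((pvOrdered F).foldl (fun out kv => out.modify kv.1.1 [] (fun l => l ++ [kv.2]))
      (PySem.Dict.empty : PySem.Dict Int (List (String × String)))).keys = pvYS F := by
    have h := PySem.Dict.keys_foldl_modify_key (pvOrdered F) (fun kv => kv.1.1) []
      (fun _ kv => fun l => l ++ [kv.2]) PySem.Dict.empty
    rw [show ((pvOrdered F).foldl (fun out kv => out.modify kv.1.1 [] (fun l => l ++ [kv.2]))
        (PySem.Dict.empty : PySem.Dict Int (List (String × String)))).keys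
        = PySem.Set.update PySem.Dict.empty.keys ((pvOrdered F).map (fun kv => kv.1.1)) from h,
      PySem.Dict.keys_empty, pv_update_nil]
    rfl
  have hgetD : ∀ y, ((pvOrdered F).foldl (fun out kv => out.modify kv.1.1 [] (fun l => l ++ [kv.2]))
      (PySem.Dict.empty : PySem.Dict Int (List (String × String)))).getD y [] = pvVal F y := by
    intro y
    have h0 : ((pvOrdered F).foldl (fun out kv => out.modify kv.1.1 [] (fun l => l ++ [kv.2]))
        (PySem.Dict.empty : PySem.Dict Int (List (String × String))))
        = (((pvOrdered F).map (fun kv => (kv.1.1, kv.2))).foldl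
            (fun d p => d.modify p.1 [] (fun l => l ++ [p.2])) PySem.Dict.empty) := by
      rw [List.foldl_map]
    rw [h0, PySem.Dict.getD_foldl_modify_append, PySem.Dict.getD_empty]
    simp only [List.nil_append, pvVal, List.filter_map, List.map_map]
    rfl
  rw [PySem.Dict.items_eq_map_keys _ hnd [], hkeys]
  exact List.map_congr_left (fun y _ => by rw [hgetD])

-- === the survivor scan equals the globally sorted deduplicated items ===

def pvToEvent (kv : (Int × String) × (String × String)) : Int × String × String × String :=
  (kv.1.1, kv.1.2, kv.2.1, kv.2.2)

theorem pv_eq_of_perm_of_pairwise {α : Type} (r : α → α → Prop)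
    (hasymm : ∀ a b, r a b → ¬ r b a) :
    ∀ (l m : List α), l.Perm m → l.Pairwise r → m.Pairwise r → l = m := by
  intro l
  induction l with
  | nil =>
    intro m hp _ _
    exact (List.Perm.eq_nil hp.symm).symm
  | cons a l ih =>
    intro m hp hl hm
    cases m with
    | nil =>
      have := hp.length_eq
      simp at this
    | cons b m' =>
      have hab : a = b := by
        by_contra hne
        have ha : a ∈ b :: m' := hp.subset (List.mem_cons_self ..)
        have ham' : a ∈ m' := by
          rcases List.mem_cons.mp ha with h | h
          · exact absurd h hne
          · exact h
        have hrba : r b a := (List.pairwise_cons.mp hm).1 a ham'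
        have hb : b ∈ a :: l := hp.symm.subset (List.mem_cons_self ..)
        have hbl : b ∈ l := by
          rcases List.mem_cons.mp hb with h | h
          · exact absurd h.symm hne
          · exact h
        have hrab : r a b := (List.pairwise_cons.mp hl).1 b hbl
        exact hasymm _ _ hrab hrba
      subst hab
      rw [ih m' (hp.cons_inv) (List.pairwise_cons.mp hl).2 (List.pairwise_cons.mp hm).2]

theorem pv_getLast_iff_ded (F : List (Int × String × String × String))
    (e : Int × String × String × String) :
    (F.filter (fun f => decide (f.1 = e.1 ∧ f.2.1 = e.2.1))).getLast? = some e ↔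
      (pvDed F).get? (e.1, e.2.1) = some e.2.2 := by
  unfold pvDed
  rw [pv_foldl_insert_get? F PySem.Dict.empty e.1 e.2.1]
  rw [PySem.Dict.get?_empty, Option.or_none]
  constructor
  · intro h
    rw [h]
    rfl
  · intro h
    cases hg : (F.filter (fun f => decide (f.1 = e.1 ∧ f.2.1 = e.2.1))).getLast? with
    | none => rw [hg] at h; simp at h
    | some f =>
      rw [hg] at h
      simp only [Option.map_some, Option.some_inj] at h
      have hfm : f ∈ F.filter (fun f => decide (f.1 = e.1 ∧ f.2.1 = e.2.1)) :=
        List.mem_of_getLast? hg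
      have hfk := (List.mem_filter.mp hfm).2
      simp only [decide_eq_true_eq] at hfk
      have hfe : f = e := by
        obtain ⟨f1, f2, f3⟩ := f
        obtain ⟨e1, e2, e3⟩ := e
        simp only at hfk h
        simp [hfk.1, hfk.2, h]
      rw [hfe]

theorem pv_mem_M_iff (F : List (Int × String × String × String))
    (e : Int × String × String × String) :
    e ∈ (pvOrdered F).map pvToEvent ↔ (pvDed F).get? (e.1, e.2.1) = some e.2.2 := by
  rw [List.mem_map]
  constructor
  · rintro ⟨kv, hkv, rfl⟩
    obtain ⟨⟨y, d⟩, v⟩ := kv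
    exact (pv_mem_ordered F y d v).mp hkv
  · intro h
    refine ⟨((e.1, e.2.1), e.2.2), (pv_mem_ordered F e.1 e.2.1 e.2.2).mpr h, ?_⟩
    obtain ⟨e1, e2, e3⟩ := e
    rfl

theorem pv_M_pairwise (F : List (Int × String × String × String))
    (hF : ∀ e ∈ F, e.2.1 = pvDate e.2.2.1) :
    ((pvOrdered F).map pvToEvent).Pairwise (pvLt pvK1 pvK2) := by
  rw [List.pairwise_map]
  have hshape : ∀ p ∈ pvOrdered F, p.1.2 = pvDate p.2.1 :=
    fun p hp => pv_ded_items_shape F hF p ((pv_ordered_perm F).subset hp)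
  have h2 : (pvOrdered F).Pairwise (fun a b => a.1 ≠ b.1) :=
    List.pairwise_map.mp (pv_ordered_keys_nodup F)
  refine ((pv_ordered_pairwise F).and h2).imp_of_mem ?_
  intro a b ha hb hR
  obtain ⟨hR, hne⟩ := hR
  rcases hR with hlt | ⟨hy, hts⟩
  · exact Or.inl hlt
  · refine Or.inr ⟨hy, ?_⟩
    have hda := hshape a ha
    have hdb := hshape b hb
    have hdne : a.1.2 ≠ b.1.2 := by
      intro hd
      exact hne (Prod.ext hy hd)
    rcases lt_or_eq_of_le hts with hts' | hts'
    · have hd_le : pvDate a.2.1 ≤ pvDate b.2.1 := pv_date_le _ _ hts'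
      rw [← hda, ← hdb] at hd_le
      exact lt_of_le_of_ne hd_le hdne
    · exact absurd (by rw [hda, hdb, hts']) hdne

theorem pv_last_eq (F : List (Int × String × String × String))
    (hF : ∀ e ∈ F, e.2.1 = pvDate e.2.2.1) :
    pvLastOfRun (PySem.List.sorted2 F (fun e => e.1) (fun e => e.2.1))
      = (pvOrdered F).map pvToEvent := by
  have hS : (PySem.List.sorted2 F (fun e => e.1) (fun e => e.2.1)).Pairwise (pvLe pvK1 pvK2) := by
    have h := pv_sorted2_pairwise F (fun e => e.1) (fun e => e.2.1)
    exact h.imp (fun hab => hab)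
  have hLpw := pv_lastOfRun_pairwise _ hS
  have hMpw := pv_M_pairwise F hF
  have hmem : ∀ e, e ∈ pvLastOfRun (PySem.List.sorted2 F (fun e => e.1) (fun e => e.2.1))
      ↔ e ∈ (pvOrdered F).map pvToEvent := by
    intro e
    rw [pv_lastOfRun_mem_iff _ hS e, pv_mem_M_iff F e]
    rw [show (PySem.List.sorted2 F (fun e => e.1) (fun e => e.2.1)).filter
          (fun f => decide (f.1 = e.1 ∧ f.2.1 = e.2.1))
        = F.filter (fun f => decide (f.1 = e.1 ∧ f.2.1 = e.2.1)) from
      pv_sorted2_filter F (fun e => e.1) (fun e => e.2.1) e.1 e.2.1]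
    exact pv_getLast_iff_ded F e
  have hndL : (pvLastOfRun (PySem.List.sorted2 F (fun e => e.1) (fun e => e.2.1))).Nodup :=
    hLpw.imp (fun h => by rintro rfl; exact pv_lt_asymm pvK1 pvK2 _ _ h h)
  have hndM : ((pvOrdered F).map pvToEvent).Nodup :=
    hMpw.imp (fun h => by rintro rfl; exact pv_lt_asymm pvK1 pvK2 _ _ h h)
  have hperm := (List.perm_ext_iff_of_nodup hndL hndM).mpr hmem
  exact pv_eq_of_perm_of_pairwise _ (pv_lt_asymm pvK1 pvK2) _ _ hperm hLpw hMpw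

-- ===== VERDICT (by name: the statement is the Claim_ definition above) =====
theorem merge_timestamps_spec : Claim_equal_merge_timestamps := by
  intro seed ys ye _ _
  unfold Spec_merge_timestamps merge_timestamps merge_timestamps_alt
  dsimp only
  rw [pv_dictA_eq seed ys ye, pv_eventsB_eq seed ys ye]
  have hF : ∀ e ∈ pvEvents seed ys ye, e.2.1 = pvDate e.2.2.1 := by
    intro e he
    simp only [pvEvents, List.mem_map] at he
    obtain ⟨p, -, rfl⟩ := he
    rfl
  rw [pv_last_eq _ hF, List.foldl_map]
  rw [show (fun (out : PySem.Dict Int (List (String × String)))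
        (kv : (Int × String) × (String × String)) =>
        out.modify (pvToEvent kv).1 [] (fun l => l ++ [((pvToEvent kv).2.2.1, (pvToEvent kv).2.2.2)]))
      = (fun out kv => out.modify kv.1.1 [] (fun l => l ++ [kv.2])) from by
    funext out kv
    obtain ⟨⟨y, d⟩, t, u⟩ := kv
    rfl]
  rw [pv_out_items, pv_keys_sorted]
  exact List.map_congr_left (fun y _ => by rw [pv_vals_sorted _ hF y])
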